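-- pv_equiv track=rewrite | github.com/asalt/MSPCRunner | src/mspcrunner/commands.py | parse_rawname
-- ===== SOURCE A (Python) =====
-- from typing import Any, Dict, Iterable, List, Mapping, Tuple, Collection
--
-- def parse_rawname(name: str) -> Tuple[str, str, str]:
--     """yield up to the first 3 numbers in a string separated by underscore
--     returns None when number is missing / interrupted
--     """
--     if name is None:
--         name = ""
--
--     namesplit = name.split("_")
--     yield_counter = 0
--     for x in namesplit:
--         if x.isnumeric() and yield_counter < 3:
--             yield_counter += 1
--             yield x
--         else:
--             break
--     while yield_counter < 3:
--         yield_counter += 1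
--         yield None
-- ===== SOURCE B (Python) =====
-- def parse_rawname(name):
--     """yield up to the first 3 numbers in a string separated by underscore
--     returns None when number is missing / interrupted
--     """
--     def go(tokens, k):
--         if k == 0:
--             return []
--         if tokens and tokens[0].isnumeric():
--             return [tokens[0]] + go(tokens[1:], k - 1)
--         return [None] * k
--     yield from go((name or "").split("_"), 3)
-- ===== Notes on version B (the rewrite author's own statement) =====
-- stated objective: alternative
-- what changed: Replaces A's counter-driven for-loop followed by a separate while-loop pad with a single bounded recursion over the token list that, when it stops, emits all remaining Nones at once from the remaining budget.
import Mathlib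
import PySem

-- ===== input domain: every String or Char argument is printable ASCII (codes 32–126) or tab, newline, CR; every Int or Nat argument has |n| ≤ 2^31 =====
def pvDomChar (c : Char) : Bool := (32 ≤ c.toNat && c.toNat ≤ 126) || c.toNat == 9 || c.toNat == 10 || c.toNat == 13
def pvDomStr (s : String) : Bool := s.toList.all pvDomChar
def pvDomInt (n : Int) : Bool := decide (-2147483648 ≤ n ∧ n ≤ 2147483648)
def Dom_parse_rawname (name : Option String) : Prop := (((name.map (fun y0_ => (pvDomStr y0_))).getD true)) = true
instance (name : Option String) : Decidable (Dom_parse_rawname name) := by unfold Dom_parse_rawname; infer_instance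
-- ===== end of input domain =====

-- B replaces A's counter loop + separate while-pad by one bounded recursion that pads on stop; same values everywhere ('alternative').
-- Python's str.isnumeric is ported as PySem.Str.strIsdigit: on the ASCII domain isnumeric coincides with isdigit.

-- ===== PORT A =====
-- the 'for x in namesplit' loop with the yield counter; break = return with current counter
def parse_rawname_for : List String → Int → List (Option String) × Int
  | [], c => ([], c)
  | x :: rest, c =>
      if PySem.Str.strIsdigit x && decide (c < 3) then
        let r := parse_rawname_for rest (c + 1)
        (some x :: r.1, r.2)
      else ([], c)

-- the trailing 'while yield_counter < 3: yield None' loop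
def parse_rawname_while (c : Int) : List (Option String) :=
  if h : c < 3 then none :: parse_rawname_while (c + 1) else []
termination_by (3 - c).toNat
decreasing_by omega

def parse_rawname (name : Option String) : List (Option String) :=
  let name' := match name with | none => "" | some s => s
  let namesplit := (PySem.Str.split? name' "_").getD []
  let r := parse_rawname_for namesplit 0
  r.1 ++ parse_rawname_while r.2

-- ===== PORT B =====
-- the recursive helper 'go(tokens, k)' of Source B
def parse_rawname_go : List String → Nat → List (Option String)
  | _, 0 => []
  | tokens, Nat.succ m =>
      match tokens with
      | t :: rest =>
          if PySem.Str.strIsdigit t then some t :: parse_rawname_go rest m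
          else List.replicate (m + 1) none
      | [] => List.replicate (m + 1) none

def parse_rawname_alt (name : Option String) : List (Option String) :=
  let tokens := (PySem.Str.split? (match name with | none => "" | some s => if s = "" then "" else s) "_").getD []
  parse_rawname_go tokens 3

-- ===== PRECONDITION & SPEC =====
def Spec_parse_rawname (name : Option String) (out : List (Option String)) : Prop := out = parse_rawname_alt name
instance (name : Option String) (out : List (Option String)) : Decidable (Spec_parse_rawname name out) := by unfold Spec_parse_rawname; infer_instance

-- ===== CLAIM =====
def Claim_equal_parse_rawname : Prop := ∀ (name : Option String), Dom_parse_rawname name → Spec_parse_rawname name (parse_rawname name)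

-- ===== LEMMAS AND PROOFS =====

lemma for_cons_pos (x : String) (rest : List String) (c : Int)
    (h1 : PySem.Str.strIsdigit x = true) (h2 : c < 3) :
    parse_rawname_for (x :: rest) c
      = (some x :: (parse_rawname_for rest (c + 1)).1, (parse_rawname_for rest (c + 1)).2) := by
  simp only [parse_rawname_for]
  rw [h1]
  simp [h2]

lemma for_cons_negdig (x : String) (rest : List String) (c : Int)
    (h1 : PySem.Str.strIsdigit x = false) :
    parse_rawname_for (x :: rest) c = ([], c) := by
  simp only [parse_rawname_for]
  rw [h1]
  simp

lemma for_cons_negcnt (x : String) (rest : List String) (c : Int) (h2 : ¬ c < 3) :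
    parse_rawname_for (x :: rest) c = ([], c) := by
  simp [parse_rawname_for, h2]

-- the while loop pads with exactly the missing number of Nones
lemma while_eq_replicate (n : Nat) (hn : n ≤ 3) :
    parse_rawname_while (3 - (n : Int)) = List.replicate n none := by
  induction n with
  | zero => unfold parse_rawname_while; simp
  | succ m ih =>
      unfold parse_rawname_while
      have h : (3 : Int) - (↑(m + 1)) < 3 := by push_cast; omega
      rw [dif_pos h]
      have h2 : (3 : Int) - ↑(m + 1) + 1 = 3 - (m : Int) := by push_cast; omega
      rw [h2, ih (by omega)]
      rfl

-- A's loop (started with counter 3 - n) followed by its pad loop equals B's recursion with budget n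
lemma forA_eq_go (xs : List String) (n : Nat) (hn : n ≤ 3) :
    (parse_rawname_for xs (3 - (n : Int))).1
        ++ parse_rawname_while (parse_rawname_for xs (3 - (n : Int))).2
      = parse_rawname_go xs n := by
  induction n generalizing xs with
  | zero =>
      have hw : parse_rawname_while 3 = [] := by unfold parse_rawname_while; simp
      cases xs with
      | nil => simp [parse_rawname_for, parse_rawname_go, hw]
      | cons x rest =>
          rw [for_cons_negcnt x rest _ (by norm_num)]
          simp [parse_rawname_go, hw]
  | succ m ih =>
      cases xs with
      | nil =>
          simp only [parse_rawname_for, List.nil_append, parse_rawname_go]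
          exact while_eq_replicate (m + 1) hn
      | cons x rest =>
          by_cases hx : PySem.Str.strIsdigit x = true
          · have hc : (3 : Int) - ((m + 1 : Nat) : Int) < 3 := by push_cast; omega
            rw [for_cons_pos x rest _ hx hc]
            have hstep : (3 : Int) - ((m + 1 : Nat) : Int) + 1 = 3 - (m : Int) := by
              push_cast; omega
            rw [hstep]
            simp only [List.cons_append, parse_rawname_go, hx, if_pos]
            rw [ih rest (by omega)]
          · rw [for_cons_negdig x rest _ (by simpa using hx)]
            simp only [List.nil_append, parse_rawname_go, hx]
            simpa using while_eq_replicate (m + 1) hn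

-- (name or "") in B and the plain match in port A produce the same string
lemma name_or_eq (name : Option String) :
    (match name with | none => "" | some s => if s = "" then "" else s)
      = (match name with | none => "" | some s => s) := by
  cases name with
  | none => rfl
  | some s => by_cases h : s = "" <;> simp [h]

-- ===== VERDICT =====
theorem parse_rawname_spec : Claim_equal_parse_rawname := by
  intro name _
  unfold Spec_parse_rawname parse_rawname parse_rawname_alt
  rw [name_or_eq]
  have h0 : (0 : Int) = 3 - ((3 : Nat) : Int) := by norm_num
  rw [h0]
  exact forA_eq_go _ 3 (le_refl 3)
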